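-- pv_equiv track=rewrite | github.com/ErfanSharifi/Jupyter-Messenger | Messenger/module/CheckName.py | chk_str
-- ===== SOURCE A (Python) =====
-- def chk_str(a):
--
--     val =False
--
--     alphabet = ['a', 'b', 'c', 'd', 'e', 'f', 'g', 'h', 'i', 'j', 'k', 'l', 'm', 'n', 'o', 'p', 'q', 'r', 's', 'u', 'v','w', 'x', 'y', 'z']
--
--     if (type(a) == str):
--         for i in range(len(a)):
--             for j in range(len(alphabet)):
--                 if (a[i]== alphabet[j]):
--                     val =True
--                     break
--                 else:
--                     try:
--                         f =int(a[i])
--                         val =False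
--                     except ValueError:
--                         pass
--
--     else:
--         val =False
--
--     return val
-- ===== SOURCE B (Python) =====
-- LETTERS = frozenset('abcdefghijklmnopqrsuvwxyz')  # same 25 letters as A (no 't')
--
-- def chk_str(a):
--     if type(a) != str:
--         return False
--     for c in reversed(a):
--         if c in LETTERS:
--             return True
--         try:
--             int(c)
--             return False
--         except ValueError:
--             continue
--     return False
-- ===== Notes on version B (the rewrite author's own statement) =====
-- stated objective: faster
-- what changed: A scans the whole string forward, testing each character against a 25-element list in a nested loop while carrying a flag; B scans backwards and returns at the first (i.e. last) letter-or-digit character, with a set membership test.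
import Mathlib
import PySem

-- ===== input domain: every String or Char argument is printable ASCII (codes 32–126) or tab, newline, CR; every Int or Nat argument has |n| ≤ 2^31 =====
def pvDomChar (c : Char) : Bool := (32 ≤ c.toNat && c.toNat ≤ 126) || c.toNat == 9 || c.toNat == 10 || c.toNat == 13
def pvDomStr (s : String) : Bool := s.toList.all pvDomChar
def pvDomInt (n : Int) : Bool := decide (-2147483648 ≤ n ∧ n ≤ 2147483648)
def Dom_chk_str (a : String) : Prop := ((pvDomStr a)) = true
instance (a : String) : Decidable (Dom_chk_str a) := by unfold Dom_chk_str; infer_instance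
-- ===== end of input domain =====

-- B replaces A's forward scan with a nested 25-element list walk by a backward scan with
-- early exit at the last letter-or-digit character (objective: faster; measured).

-- ===== PORT A =====
-- A's alphabet literal: a-z without 't'
def pvAlphabet : List Char :=
  ['a','b','c','d','e','f','g','h','i','j','k','l','m','n','o','p','q','r','s','u','v','w','x','y','z']

-- `int(a[i])` succeeds for a single printable-ASCII char exactly when it is '0'-'9' (exact on Dom)
def pvIsDig (c : Char) : Bool := '0' ≤ c && c ≤ '9'

-- A's inner `for j in range(len(alphabet))` loop with its break / try-int-else-pass, carrying val
def pvInnerA (c : Char) (val : Bool) : List Char → Bool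
  | [] => val
  | l :: ls => if c == l then true
               else pvInnerA c (if pvIsDig c then false else val) ls

def chk_str (a : String) : Bool :=
  a.toList.foldl (fun val c => pvInnerA c val pvAlphabet) false

-- ===== PORT B =====
-- B's frozenset of the same 25 letters
def pvLetters : List Char := pvAlphabet

-- B's `for c in reversed(a)` loop with its two early returns
def pvChkRev : List Char → Bool
  | [] => false
  | c :: cs => if pvLetters.contains c then true
               else if pvIsDig c then false
               else pvChkRev cs

def chk_str_alt (a : String) : Bool := pvChkRev a.toList.reverse

-- ===== PRECONDITION & SPEC =====
def Spec_chk_str (a : String) (out : Bool) : Prop := out = chk_str_alt a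
instance (a : String) (out : Bool) : Decidable (Spec_chk_str a out) := by unfold Spec_chk_str; infer_instance

-- ===== CLAIM (what is proved, stated in full; the proofs are below) =====
def Claim_equal_chk_str : Prop := ∀ (a : String), Dom_chk_str a → Spec_chk_str a (chk_str a)

-- ===== LEMMAS AND PROOFS =====

-- the per-character step both loops implement
def pvStep (val : Bool) (c : Char) : Bool :=
  if pvLetters.contains c then true else if pvIsDig c then false else val

-- pvChkRev generalized over the value reached when no char decides
def pvG : List Char → Bool → Bool
  | [], val => val
  | c :: cs, val => if pvLetters.contains c then true
                    else if pvIsDig c then false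
                    else pvG cs val

theorem pvInnerA_eq (c : Char) (val : Bool) (l : Char) (ls : List Char) :
    pvInnerA c val (l :: ls) = if (l :: ls).contains c then true else if pvIsDig c then false else val := by
  induction ls generalizing l val with
  | nil =>
    by_cases hc : c = l
    · simp [pvInnerA, hc]
    · have hb : (c == l) = false := by simpa using hc
      have h0 : pvInnerA c val [l]
          = if c == l then true else pvInnerA c (if pvIsDig c then false else val) [] := rfl
      rw [h0, hb, List.contains_cons, hb]
      simp [pvInnerA]
  | cons l' ls ih =>
    by_cases hc : c = l
    · simp [pvInnerA, hc]
    · have hb : (c == l) = false := by simpa using hc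
      have h0 : pvInnerA c val (l :: l' :: ls)
          = if c == l then true
            else pvInnerA c (if pvIsDig c then false else val) (l' :: ls) := rfl
      rw [h0, hb, if_neg (by simp), ih, List.contains_cons (a := l), hb, Bool.false_or]
      split_ifs <;> rfl

theorem pvG_append (xs : List Char) (c : Char) (val : Bool) :
    pvG (xs ++ [c]) val = pvG xs (pvStep val c) := by
  induction xs with
  | nil => simp [pvG, pvStep]
  | cons x xs ih => simp [pvG, ih]

theorem pvFoldl_eq_pvG (l : List Char) (val : Bool) :
    l.foldl pvStep val = pvG l.reverse val := by
  induction l generalizing val with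
  | nil => simp [pvG]
  | cons c cs ih => simp [List.foldl, ih, pvG_append]

theorem pvChkRev_eq_pvG (l : List Char) : pvChkRev l = pvG l false := by
  induction l with
  | nil => rfl
  | cons c cs ih => simp [pvChkRev, pvG, ih]

-- ===== VERDICT (by name: the statement is the Claim_ definition above) =====
theorem chk_str_spec : Claim_equal_chk_str := by
  intro a _
  unfold Spec_chk_str chk_str chk_str_alt
  have hstep : (fun val c => pvInnerA c val pvAlphabet) = pvStep := by
    funext val c
    unfold pvAlphabet
    rw [pvInnerA_eq]
    simp only [pvStep, pvLetters, pvAlphabet]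
    rfl
  rw [hstep, pvFoldl_eq_pvG, pvChkRev_eq_pvG]
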